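-- pv_equiv track=rewrite | github.com/franciscomaestre/text_analisys | seo/audits/site/better_headlines.py | _getBetterSentenceWithTokens
-- ===== SOURCE A (Python) =====
-- def _getBetterSentenceWithTokens(sentences, tokens):
--     betterSentences = []
--
--     for title in sentences:
--         found = False
--         for token, _score in tokens:
--             if token in title:
--                 found = True
--                 break
--         if found:
--             betterSentences.append(title)
--
--     return betterSentences
-- ===== SOURCE B (Python) =====
-- def _getBetterSentenceWithTokens(sentences, tokens):
--     # Token-outer traversal: mark the indices of sentences hit by any token,
--     # then emit the marked sentences in their original order.
--     matched = set()
--     for token, _score in tokens: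
--         for i, title in enumerate(sentences):
--             if i not in matched and token in title:
--                 matched.add(i)
--     return [title for i, title in enumerate(sentences) if i in matched]
-- ===== Notes on version B (the rewrite author's own statement) =====
-- stated objective: alternative
-- what changed: A scans token-inner per sentence with an early break; B inverts the traversal (token-outer), marking matched sentence indices in a set and then emitting marked sentences in order.
import Mathlib
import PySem

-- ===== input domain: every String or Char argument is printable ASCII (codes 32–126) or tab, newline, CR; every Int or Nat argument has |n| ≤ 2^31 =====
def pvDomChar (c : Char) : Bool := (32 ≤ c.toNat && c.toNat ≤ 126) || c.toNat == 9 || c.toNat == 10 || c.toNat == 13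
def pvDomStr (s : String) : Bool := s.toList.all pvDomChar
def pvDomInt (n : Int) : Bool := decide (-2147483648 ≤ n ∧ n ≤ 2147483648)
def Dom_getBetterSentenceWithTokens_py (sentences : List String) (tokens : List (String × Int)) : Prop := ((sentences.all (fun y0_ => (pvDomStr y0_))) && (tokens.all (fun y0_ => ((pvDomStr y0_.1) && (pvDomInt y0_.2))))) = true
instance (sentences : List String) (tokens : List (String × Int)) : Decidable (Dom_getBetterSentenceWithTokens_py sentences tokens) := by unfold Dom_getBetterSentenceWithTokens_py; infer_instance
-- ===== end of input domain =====

-- B inverts A's traversal: token-outer marking of matched sentence indices into a set,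
-- then the marked sentences are emitted in original order (alternative decomposition, same cost).


-- ===== PORT A =====
-- inner 'for token, _score in tokens: if token in title: found = True; break'
def pvFoundTok (tokens : List (String × Int)) (title : String) : Bool :=
  match tokens with
  | [] => false
  | (token, _score) :: rest =>
      if PySem.Str.isIn token title then true else pvFoundTok rest title

def getBetterSentenceWithTokens_py (sentences : List String) (tokens : List (String × Int)) : List String :=
  sentences.foldl
    (fun betterSentences title =>
      if pvFoundTok tokens title then betterSentences ++ [title] else betterSentences)
    []

-- ===== PORT B =====
-- inner 'for i, title in enumerate(sentences): if i not in matched and token in title: matched.add(i)'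
def pvMark (sentences : List String) (matched : PySem.Set Int) (token : String) : PySem.Set Int :=
  (PySem.List.enumerate sentences).foldl
    (fun matched p =>
      if !(PySem.Set.contains matched p.1) && PySem.Str.isIn token p.2
      then PySem.Set.add matched p.1 else matched)
    matched

def getBetterSentenceWithTokens_py_alt (sentences : List String) (tokens : List (String × Int)) : List String :=
  let matched := tokens.foldl (fun matched t => pvMark sentences matched t.1) PySem.Set.empty
  ((PySem.List.enumerate sentences).filter (fun p => PySem.Set.contains matched p.1)).map (·.2)

-- ===== PRECONDITION & SPEC =====
def Spec_getBetterSentenceWithTokens_py (sentences : List String) (tokens : List (String × Int)) (out : List String) : Prop := out = getBetterSentenceWithTokens_py_alt sentences tokens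
instance (sentences : List String) (tokens : List (String × Int)) (out : List String) : Decidable (Spec_getBetterSentenceWithTokens_py sentences tokens out) := by unfold Spec_getBetterSentenceWithTokens_py; infer_instance

-- ===== CLAIM (what is proved, stated in full; the proofs are below) =====
def Claim_equal_getBetterSentenceWithTokens_py : Prop := ∀ (sentences : List String) (tokens : List (String × Int)), Dom_getBetterSentenceWithTokens_py sentences tokens → Spec_getBetterSentenceWithTokens_py sentences tokens (getBetterSentenceWithTokens_py sentences tokens)

-- ===== LEMMAS AND PROOFS =====

-- A's inner loop is an 'any' over the tokens.
theorem pvFoundTok_eq_any (tokens : List (String × Int)) (title : String) :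
    pvFoundTok tokens title = tokens.any (fun t => PySem.Str.isIn t.1 title) := by
  induction tokens with
  | nil => rfl
  | cons t rest ih =>
      obtain ⟨token, score⟩ := t
      simp [pvFoundTok, ih]

-- membership after one marking pass over an arbitrary (index, title) list
theorem mem_mark_fold (l : List (Int × String)) (m : PySem.Set Int) (token : String) (i : Int) :
    i ∈ l.foldl
      (fun matched p =>
        if !(PySem.Set.contains matched p.1) && PySem.Str.isIn token p.2
        then PySem.Set.add matched p.1 else matched) m
    ↔ i ∈ m ∨ ∃ p ∈ l, p.1 = i ∧ PySem.Str.isIn token p.2 = true := by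
  induction l generalizing m with
  | nil => simp
  | cons q l ih =>
      simp only [List.foldl_cons]
      by_cases hc : PySem.Set.contains m q.1 = true
      · simp only [hc, Bool.not_true, Bool.false_and, List.mem_cons]
        rw [ih]
        rw [PySem.Set.contains_iff] at hc
        constructor
        · rintro (h | ⟨p, hp, h1, h2⟩)
          exacts [Or.inl h, Or.inr ⟨p, Or.inr hp, h1, h2⟩]
        · rintro (h | ⟨p, rfl | hp, h1, h2⟩)
          · exact Or.inl h
          · exact Or.inl (h1 ▸ hc)
          · exact Or.inr ⟨p, hp, h1, h2⟩
      · by_cases ht : PySem.Str.isIn token q.2 = true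
        · simp only [hc, ht, Bool.not_false, Bool.and_true, if_true, List.mem_cons]
          rw [ih]
          simp only [PySem.Set.mem_add]
          constructor
          · rintro ((h | h) | ⟨p, hp, h1, h2⟩)
            · exact Or.inl h
            · exact Or.inr ⟨q, Or.inl rfl, h.symm, ht⟩
            · exact Or.inr ⟨p, Or.inr hp, h1, h2⟩
          · rintro (h | ⟨p, rfl | hp, h1, h2⟩)
            · exact Or.inl (Or.inl h)
            · exact Or.inl (Or.inr h1.symm)
            · exact Or.inr ⟨p, hp, h1, h2⟩
        · simp only [hc, ht, Bool.and_false, List.mem_cons]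
          rw [ih]
          constructor
          · rintro (h | ⟨p, hp, h1, h2⟩)
            exacts [Or.inl h, Or.inr ⟨p, Or.inr hp, h1, h2⟩]
          · rintro (h | ⟨p, rfl | hp, h1, h2⟩)
            · exact Or.inl h
            · exact absurd h2 ht
            · exact Or.inr ⟨p, hp, h1, h2⟩

theorem mem_mark (sentences : List String) (m : PySem.Set Int) (token : String) (i : Int) :
    i ∈ pvMark sentences m token
    ↔ i ∈ m ∨ ∃ p ∈ PySem.List.enumerate sentences, p.1 = i ∧ PySem.Str.isIn token p.2 = true := by
  unfold pvMark; exact mem_mark_fold _ m token i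

theorem mem_matched (tokens : List (String × Int)) (sentences : List String) (m : PySem.Set Int) (i : Int) :
    i ∈ tokens.foldl (fun matched t => pvMark sentences matched t.1) m
    ↔ i ∈ m ∨ ∃ t ∈ tokens, ∃ p ∈ PySem.List.enumerate sentences,
        p.1 = i ∧ PySem.Str.isIn t.1 p.2 = true := by
  induction tokens generalizing m with
  | nil => simp
  | cons t rest ih =>
      simp only [List.foldl_cons, ih, mem_mark, List.mem_cons]
      constructor
      · rintro ((h | h) | ⟨u, hu, h⟩)
        · exact Or.inl h
        · exact Or.inr ⟨t, Or.inl rfl, h⟩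
        · exact Or.inr ⟨u, Or.inr hu, h⟩
      · rintro (h | ⟨u, hu | hu, h⟩)
        · exact Or.inl (Or.inl h)
        · subst hu; exact Or.inl (Or.inr h)
        · exact Or.inr ⟨u, hu, h⟩

-- an element of 'enumerate sentences' is determined by its index
theorem enumerate_fst_inj {sentences : List String} {p q : Int × String}
    (hp : p ∈ PySem.List.enumerate sentences) (hq : q ∈ PySem.List.enumerate sentences)
    (h : p.1 = q.1) : p = q := by
  rw [PySem.List.mem_enumerate_iff] at hp hq
  obtain ⟨k, hk, rfl⟩ := hp
  obtain ⟨k', hk', rfl⟩ := hq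
  simp only at h
  have : k = k' := by omega
  subst this; rfl

theorem filter_map_enumerate (sentences : List String) (s : Int) (q : String → Bool) :
    ((PySem.List.enumerate sentences s).filter (fun p => q p.2)).map (·.2)
      = sentences.filter q := by
  induction sentences generalizing s with
  | nil => rfl
  | cons x xs ih =>
      rw [PySem.List.enumerate_cons]
      by_cases h : q x = true <;> simp [h, ih]

-- ===== VERDICT (by name: the statement is the Claim_ definition above) =====
theorem getBetterSentenceWithTokens_py_spec : Claim_equal_getBetterSentenceWithTokens_py := by
  unfold Claim_equal_getBetterSentenceWithTokens_py
  intro sentences tokens _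
  unfold Spec_getBetterSentenceWithTokens_py
  unfold getBetterSentenceWithTokens_py getBetterSentenceWithTokens_py_alt
  rw [PySem.List.foldl_append_if_eq_filter]
  simp only [List.nil_append]
  rw [List.filter_congr (l := PySem.List.enumerate sentences)
    (q := fun p => tokens.any (fun t => PySem.Str.isIn t.1 p.2))
    (by
      intro p hp
      rw [Bool.eq_iff_iff, PySem.Set.contains_iff, mem_matched, List.any_eq_true]
      simp only [PySem.Set.empty, List.not_mem_nil, false_or]
      constructor
      · rintro ⟨t, ht, u, hu, h1, h2⟩
        have := enumerate_fst_inj hu hp h1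
        subst this
        exact ⟨t, ht, h2⟩
      · rintro ⟨t, ht, h⟩
        exact ⟨t, ht, p, hp, rfl, h⟩)]
  rw [filter_map_enumerate sentences 0 (fun title => tokens.any (fun t => PySem.Str.isIn t.1 title))]
  apply List.filter_congr
  intro title _
  rw [pvFoundTok_eq_any]
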